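-- pv_equiv track=rewrite | github.com/vtushar06/CodeForces | Codeforces Round 1026 (Div. 2)/A_Fashionable_Array.py | fashionable_array_even
-- ===== SOURCE A (Python) =====
-- def fashionable_array_even(a):
--     l, r = 0, len(a) - 1
--     count = 0
--
--     while l < r:
--         if (a[l] + a[r]) % 2 == 0:
--             return count
--         elif a[l] % 2 != 0:
--             l += 1
--             count += 1
--         elif a[r] % 2 != 0:
--             r -= 1
--             count += 1
--
--     return count
-- ===== SOURCE B (Python) =====
-- def fashionable_array_even(a):
--     # A only ever strips odd elements from one end; the answer is determined by
--     # the positions of the even elements: either the first even index (left end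
--     # odd) or the distance of the last even index from the right end.
--     n = len(a)
--     if n < 2 or (a[0] + a[-1]) % 2 == 0:
--         return 0
--     evens = [i for i, x in enumerate(a) if x % 2 == 0]
--     return evens[0] if a[0] % 2 != 0 else n - 1 - evens[-1]
-- ===== Notes on version B (the rewrite author's own statement) =====
-- stated objective: alternative
-- what changed: A's early-exiting two-pointer while loop is replaced by a non-terminating-early whole-list pass that collects the indices of all even elements into a list, after which the answer is pure index arithmetic: the first even index when the left end is odd, or n-1 minus the last even index when the right end is odd.
import Mathlib
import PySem

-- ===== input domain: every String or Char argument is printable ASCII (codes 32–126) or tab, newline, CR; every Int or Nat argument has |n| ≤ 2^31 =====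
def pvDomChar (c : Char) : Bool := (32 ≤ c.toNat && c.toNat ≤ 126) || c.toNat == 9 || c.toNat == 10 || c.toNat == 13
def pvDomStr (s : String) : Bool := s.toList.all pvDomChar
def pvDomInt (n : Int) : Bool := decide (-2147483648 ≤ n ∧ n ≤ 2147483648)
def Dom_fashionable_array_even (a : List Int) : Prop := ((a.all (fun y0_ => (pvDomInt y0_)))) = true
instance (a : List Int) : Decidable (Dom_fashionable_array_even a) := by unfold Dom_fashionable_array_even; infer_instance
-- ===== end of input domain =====

-- B replaces A's early-exiting two-pointer loop by one whole-list pass collecting the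
-- indices of the even elements, then pure index arithmetic (objective: alternative).

-- ===== PORT A =====
-- the while loop: state (l, r, count).  Both pyGet? 'none' arms and the fall-through
-- arm (sum odd but both endpoints even) are parity-impossible for every input, so no
-- input reaches them; the loop is otherwise A's body branch for branch.
def fashionableLoopA (a : List Int) (l r count : Int) : Int :=
  if _h : l < r then
    match PySem.List.pyGet? a l, PySem.List.pyGet? a r with
    | some al, some ar =>
      if PySem.Int.mod (al + ar) 2 = 0 then count
      else if PySem.Int.mod al 2 ≠ 0 then fashionableLoopA a (l + 1) r (count + 1)
      else if PySem.Int.mod ar 2 ≠ 0 then fashionableLoopA a l (r - 1) (count + 1)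
      else count   -- unreachable: sum odd forces exactly one odd endpoint
    | _, _ => count  -- unreachable: 0 ≤ l < r ≤ len-1 keeps both indices in range
  else count
termination_by (r - l).toNat
decreasing_by all_goals omega

def fashionable_array_even (a : List Int) : Int :=
  fashionableLoopA a 0 (PySem.List.len a - 1) 0

-- ===== PORT B =====
def fashionable_array_even_alt (a : List Int) : Int :=
  let n := PySem.List.len a
  if n < 2 then 0
  else
    match PySem.List.pyGet? a 0, PySem.List.pyGet? a (-1) with
    | some a0, some an =>
      if PySem.Int.mod (a0 + an) 2 = 0 then 0
      else
        -- evens = [i for i, x in enumerate(a) if x % 2 == 0]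
        let evens := ((PySem.List.enumerate a 0).filter
            (fun p => PySem.Int.mod p.2 2 == 0)).map (·.1)
        if PySem.Int.mod a0 2 ≠ 0 then
          (PySem.List.pyGet? evens 0).getD 0        -- evens[0]; nonempty here
        else
          n - 1 - (PySem.List.pyGet? evens (-1)).getD 0  -- evens[-1]; nonempty here
    | _, _ => 0  -- unreachable: len a ≥ 2

-- ===== PRECONDITION & SPEC =====
def Spec_fashionable_array_even (a : List Int) (out : Int) : Prop := out = fashionable_array_even_alt a
instance (a : List Int) (out : Int) : Decidable (Spec_fashionable_array_even a out) := by unfold Spec_fashionable_array_even; infer_instance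

-- ===== CLAIM (what is proved, stated in full; the proofs are below) =====
def Claim_equal_fashionable_array_even : Prop := ∀ (a : List Int), Dom_fashionable_array_even a → Spec_fashionable_array_even a (fashionable_array_even a)

-- ===== LEMMAS AND PROOFS =====

-- length of the leading run of odd elements
def oddRun : List Int → Int
  | [] => 0
  | x :: xs => if PySem.Int.mod x 2 = 0 then 0 else 1 + oddRun xs

-- the even-index list of B, with an explicit start offset
def evIdx (xs : List Int) (s : Int) : List Int :=
  ((PySem.List.enumerate xs s).filter (fun p => PySem.Int.mod p.2 2 == 0)).map (·.1)

theorem mod2 (z : Int) : PySem.Int.mod z 2 = z % 2 := PySem.Int.mod_eq_emod_of_pos (by norm_num)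

theorem evPred_eq :
    (fun p : Int × Int => PySem.Int.mod p.2 2 == 0) = (fun p : Int × Int => p.2 % 2 == 0) := by
  funext p; rw [mod2]

-- first even index = length of the leading odd run
theorem evIdx_head (xs : List Int) : ∀ s : Int, (∃ x ∈ xs, x % 2 = 0) →
    (evIdx xs s).head? = some (s + oddRun xs) := by
  induction xs with
  | nil => intro s h; simp at h
  | cons x xs ih =>
    intro s h
    simp only [evIdx, PySem.List.enumerate_cons, List.filter_cons]
    by_cases hx : x % 2 = 0
    · rw [if_pos (by simp [hx])]
      simp [oddRun, hx]
    · rw [if_neg (by simp [hx])]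
      have h' : ∃ y ∈ xs, y % 2 = 0 := by
        rcases h with ⟨y, hy, hye⟩
        rcases List.mem_cons.mp hy with rfl | hy'
        · exact absurd hye hx
        · exact ⟨y, hy', hye⟩
      have := ih (s + 1) h'
      simp only [evIdx] at this
      rw [this]
      simp only [oddRun, mod2]
      rw [if_neg hx]
      congr 1; ring

-- last even index = length - 1 - length of the trailing odd run
theorem evIdx_last (xs : List Int) (s : Int) (h : ∃ x ∈ xs, x % 2 = 0) :
    (evIdx xs s).getLast? = some (s + (xs.length : Int) - 1 - oddRun xs.reverse) := by
  induction xs using List.reverseRecOn with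
  | nil => simp at h
  | append_singleton ys y ih =>
    simp only [evIdx, PySem.List.enumerate_append, List.filter_append, List.map_append,
      PySem.List.enumerate_cons, PySem.List.enumerate_nil, List.filter_cons, List.filter_nil]
    by_cases hy : y % 2 = 0
    · rw [if_pos (by simp [hy])]
      simp only [List.map_cons, List.map_nil]
      rw [List.getLast?_concat]
      simp only [List.reverse_append, List.reverse_cons, List.reverse_nil, List.nil_append,
        List.singleton_append, oddRun]
      rw [if_pos (by rw [mod2]; omega)]
      simp only [List.length_append, List.length_cons, List.length_nil]
      congr 1
      push_cast; ring
    · rw [if_neg (by simp [hy])]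
      simp only [List.map_nil, List.append_nil]
      have h' : ∃ x ∈ ys, x % 2 = 0 := by
        rcases h with ⟨x, hx, hxe⟩
        rcases List.mem_append.mp hx with hx' | hx'
        · exact ⟨x, hx', hxe⟩
        · simp at hx'; subst hx'; exact absurd hxe hy
      have := ih h'
      simp only [evIdx] at this
      rw [this]
      simp only [List.reverse_append, List.reverse_cons, List.reverse_nil, List.nil_append,
        List.singleton_append, oddRun, mod2]
      rw [if_neg hy]
      congr 1
      simp only [List.length_append, List.length_cons, List.length_nil]
      push_cast; ring

-- A's loop when the RIGHT endpoint is even: only l moves; the result is the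
-- leading odd run of the remaining suffix.
theorem loopA_left (a : List Int) (r : Int) (hr : r = (a.length : Int) - 1)
    (ar : Int) (har : PySem.List.pyGet? a r = some ar) (hpar : ar % 2 = 0) :
    ∀ (k : Nat) (l c : Int), 0 ≤ l → l ≤ r → (r - l).toNat = k →
      fashionableLoopA a l r c = c + oddRun (a.drop l.toNat) := by
  intro k
  induction k with
  | zero =>
    intro l c hl hlr hk
    have hle : l = r := by omega
    subst hle
    have hlen : l.toNat < a.length := by omega
    rw [fashionableLoopA, dif_neg (by omega)]
    rw [PySem.List.pyGet?_of_nonneg a hl, List.getElem?_eq_getElem hlen] at har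
    have hv : a[l.toNat] = ar := by injection har
    rw [List.drop_eq_getElem_cons hlen]
    simp only [oddRun]
    rw [hv, if_pos (by rw [mod2]; omega)]
    ring
  | succ k ih =>
    intro l c hl hlr hk
    have hlr' : l < r := by omega
    have hlen : l.toNat < a.length := by omega
    have hgl : PySem.List.pyGet? a l = some a[l.toNat] := by
      rw [PySem.List.pyGet?_of_nonneg a hl, List.getElem?_eq_getElem hlen]
    rw [fashionableLoopA, dif_pos hlr', hgl, har]
    rw [List.drop_eq_getElem_cons hlen]
    simp only [oddRun]
    by_cases hal : a[l.toNat] % 2 = 0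
    · rw [if_pos (by rw [mod2]; omega), if_pos (by rw [mod2]; omega)]
      ring
    · rw [if_neg (by rw [mod2]; omega), if_pos (by rw [mod2]; omega),
          if_neg (by rw [mod2]; omega)]
      rw [ih (l + 1) (c + 1) (by omega) (by omega) (by omega)]
      have h1 : (l + 1).toNat = l.toNat + 1 := by omega
      rw [h1]; ring

-- A's loop when the LEFT endpoint is even: only r moves; the result is the
-- leading odd run of the reversed prefix a[:r+1].
theorem loopA_right (a : List Int) (l : Int) (hl : 0 ≤ l)
    (al : Int) (hal : PySem.List.pyGet? a l = some al) (hpar : al % 2 = 0) :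
    ∀ (k : Nat) (r c : Int), l ≤ r → r ≤ (a.length : Int) - 1 → (r - l).toNat = k →
      fashionableLoopA a l r c = c + oddRun ((a.take (r.toNat + 1)).reverse) := by
  intro k
  induction k with
  | zero =>
    intro r c hlr hrlen hk
    have hle : l = r := by omega
    subst hle
    have hlen : l.toNat < a.length := by omega
    rw [fashionableLoopA, dif_neg (by omega)]
    rw [PySem.List.pyGet?_of_nonneg a hl, List.getElem?_eq_getElem hlen] at hal
    have hv : a[l.toNat] = al := by injection hal
    rw [List.take_add_one, List.getElem?_eq_getElem hlen]
    simp only [Option.toList_some, List.reverse_append, List.reverse_cons,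
      List.reverse_nil, List.nil_append, List.singleton_append, oddRun]
    rw [hv, if_pos (by rw [mod2]; omega)]
    ring
  | succ k ih =>
    intro r c hlr hrlen hk
    have hlr' : l < r := by omega
    have hrlen' : r.toNat < a.length := by omega
    have hr0 : (0:Int) ≤ r := by omega
    have hgr : PySem.List.pyGet? a r = some a[r.toNat] := by
      rw [PySem.List.pyGet?_of_nonneg a hr0, List.getElem?_eq_getElem hrlen']
    rw [fashionableLoopA, dif_pos hlr', hal, hgr]
    rw [List.take_add_one, List.getElem?_eq_getElem hrlen']
    simp only [Option.toList_some, List.reverse_append, List.reverse_cons,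
      List.reverse_nil, List.nil_append, List.singleton_append, oddRun]
    by_cases har : a[r.toNat] % 2 = 0
    · rw [if_pos (by rw [mod2]; omega), if_pos (by rw [mod2]; omega)]
      ring
    · rw [if_neg (by rw [mod2]; omega), if_neg (by rw [mod2]; omega),
          if_pos (by rw [mod2]; omega), if_neg (by rw [mod2]; omega)]
      rw [ih (r - 1) (c + 1) (by omega) (by omega) (by omega)]
      have h1 : (r - 1).toNat + 1 = r.toNat := by omega
      rw [h1]; ring

-- ===== VERDICT (by name: the statement is the Claim_ definition above) =====
theorem fashionable_array_even_spec : Claim_equal_fashionable_array_even := by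
  intro a _
  unfold Spec_fashionable_array_even fashionable_array_even fashionable_array_even_alt
  simp only [PySem.List.len_eq]
  by_cases hsmall : (a.length : Int) < 2
  · -- len < 2: the loop never runs, both return 0
    rw [fashionableLoopA, dif_neg (by omega), if_pos (by omega)]
  · have hlen : 2 ≤ a.length := by omega
    have h0 : (0:Nat) < a.length := by omega
    have hg0 : PySem.List.pyGet? a 0 = some a[0] := by
      rw [PySem.List.pyGet?_of_nonneg a le_rfl]
      simp [List.getElem?_eq_getElem h0]
    have hlast : a.getLast? = some a[a.length - 1] := by
      rw [List.getLast?_eq_getElem?, List.getElem?_eq_getElem (by omega)]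
    have hgr : PySem.List.pyGet? a ((a.length : Int) - 1) = some a[a.length - 1] := by
      rw [PySem.List.pyGet?_of_nonneg a (by omega),
        show ((a.length : Int) - 1).toNat = a.length - 1 from by omega,
        List.getElem?_eq_getElem (by omega)]
    -- reduce B to its three cases
    rw [if_neg (by omega), PySem.List.pyGet?_neg_one, hg0, hlast]
    simp only [mod2]
    -- reduce A's loop by one iteration
    conv_lhs => rw [fashionableLoopA]
    rw [dif_pos (by omega), hg0, hgr]
    simp only [mod2]
    by_cases hsum : (a[0] + a[a.length - 1]) % 2 = 0
    · -- endpoint sum even: A returns on the first iteration, B returns 0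
      rw [if_pos hsum, if_pos hsum]
    · rw [if_neg hsum, if_neg hsum]
      by_cases ha0 : a[0] % 2 = 0
      · -- left endpoint even: A strips odds from the right; B uses the LAST even index
        rw [if_neg (by omega), if_pos (by omega), if_neg (by omega)]
        rw [loopA_right a 0 le_rfl a[0] hg0 ha0 ((a.length : Int) - 1 - 1 - 0).toNat
          ((a.length : Int) - 1 - 1) (0 + 1) (by omega) (by omega) rfl]
        rw [show ((a.length : Int) - 1 - 1).toNat + 1 = a.length - 1 from by omega]
        have hev : ∃ x ∈ a, x % 2 = 0 := ⟨a[0], List.getElem_mem h0, ha0⟩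
        have hgl : PySem.List.pyGet? ((((PySem.List.enumerate a 0).filter
              (fun p : Int × Int => p.2 % 2 == 0)).map (·.1))) (-1)
            = some (0 + (a.length : Int) - 1 - oddRun a.reverse) := by
          rw [PySem.List.pyGet?_neg_one, ← evPred_eq]
          exact evIdx_last a 0 hev
        rw [hgl]
        simp only [Option.getD_some]
        have h2 : a.length - 1 + 1 = a.length := by omega
        have hsplitr : a.reverse = a[a.length - 1] :: (a.take (a.length - 1)).reverse := by
          conv_lhs => rw [← List.take_length (l := a), ← h2, List.take_add_one,
            List.getElem?_eq_getElem (by omega)]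
          simp
        rw [hsplitr]
        simp only [oddRun]
        rw [if_neg (by rw [mod2]; omega)]
        ring
      · -- left endpoint odd: A strips odds from the left; B uses the FIRST even index
        rw [if_pos (by omega), if_pos (by omega)]
        rw [loopA_left a ((a.length : Int) - 1) rfl a[a.length - 1] hgr
          (by omega) ((a.length : Int) - 1 - (0 + 1)).toNat (0 + 1) (0 + 1)
          (by omega) (by omega) rfl]
        rw [show ((0:Int) + 1).toNat = 1 from by omega]
        have hev : ∃ x ∈ a, x % 2 = 0 :=
          ⟨a[a.length - 1], List.getElem_mem (by omega), by omega⟩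
        have hhd : PySem.List.pyGet? ((((PySem.List.enumerate a 0).filter
              (fun p : Int × Int => p.2 % 2 == 0)).map (·.1))) 0
            = some (0 + oddRun a) := by
          rw [PySem.List.pyGet?_of_nonneg _ le_rfl, ← evPred_eq]
          have := evIdx_head a 0 hev
          simp only [evIdx] at this
          rw [show (((0:Int)).toNat) = 0 from rfl, ← List.head?_eq_getElem?]
          exact this
        rw [hhd]
        simp only [Option.getD_some]
        have hsplit : a = a[0] :: a.drop 1 := by
          conv_lhs => rw [← List.drop_zero (l := a)]
          exact List.drop_eq_getElem_cons h0
        conv_rhs => rw [hsplit]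
        simp only [oddRun]
        rw [if_neg (by rw [mod2]; omega)]
        ring
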